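-- pv_equiv track=rewrite | github.com/CtrlAltDelegate/macro-dashboard | news.py | rank_macro_relevance
-- ===== SOURCE A (Python) =====
-- def rank_macro_relevance(
--     articles: list[dict[str, str]],
--     max_return: int = 5,
-- ) -> list[dict[str, str]]:
--     """
--     Rank and dedupe articles for diversity (prefer different sources/topics).
--     Returns up to max_return articles.
--     """
--     if len(articles) <= max_return:
--         return articles
--     # Prefer diversity: take by source round-robin then fill
--     by_source: dict[str, list[dict]] = {}
--     for a in articles:
--         src = a.get("source") or "Other"
--         by_source.setdefault(src, []).append(a)
--     result: list[dict[str, str]] = []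
--     used_sources: set[str] = set()
--     while len(result) < max_return and (by_source or result):
--         for src in list(by_source.keys()):
--             if not by_source[src]:
--                 del by_source[src]
--                 continue
--             result.append(by_source[src].pop(0))
--             if len(result) >= max_return:
--                 break
--         if len(result) >= max_return:
--             break
--         # If we've gone through and didn't add enough, take rest by order
--         if not by_source:
--             break
--     return result[:max_return]
-- ===== SOURCE B (Python) =====
-- def rank_macro_relevance(
--     articles: list[dict[str, str]],
--     max_return: int = 5,
-- ) -> list[dict[str, str]]:
--     """
--     Rank and dedupe articles for diversity (prefer different sources/topics).
--     Returns up to max_return articles.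
--     """
--     if len(articles) <= max_return:
--         return articles
--     # One pass: tag each article with (occurrence rank within its source,
--     # first-appearance index of its source), then stable-sort by that key.
--     counts: dict[str, int] = {}
--     firsts: dict[str, int] = {}
--     keyed = []
--     for i, a in enumerate(articles):
--         src = a.get("source") or "Other"
--         if src not in firsts:
--             firsts[src] = i
--         r = counts.get(src, 0)
--         counts[src] = r + 1
--         keyed.append((r, firsts[src], a))
--     keyed.sort(key=lambda t: (t[0], t[1]))
--     return [a for _, _, a in keyed[:max(0, max_return)]]
-- ===== Notes on version B (the rewrite author's own statement) =====
-- stated objective: alternative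
-- what changed: Replaces A's round-robin while-loop (which repeatedly pops the head of each source's queue and deletes exhausted sources from the dict) with a single tagging pass computing (per-source occurrence rank, source first-appearance index) for every article followed by one stable sort on that key and a slice.
import Mathlib
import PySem

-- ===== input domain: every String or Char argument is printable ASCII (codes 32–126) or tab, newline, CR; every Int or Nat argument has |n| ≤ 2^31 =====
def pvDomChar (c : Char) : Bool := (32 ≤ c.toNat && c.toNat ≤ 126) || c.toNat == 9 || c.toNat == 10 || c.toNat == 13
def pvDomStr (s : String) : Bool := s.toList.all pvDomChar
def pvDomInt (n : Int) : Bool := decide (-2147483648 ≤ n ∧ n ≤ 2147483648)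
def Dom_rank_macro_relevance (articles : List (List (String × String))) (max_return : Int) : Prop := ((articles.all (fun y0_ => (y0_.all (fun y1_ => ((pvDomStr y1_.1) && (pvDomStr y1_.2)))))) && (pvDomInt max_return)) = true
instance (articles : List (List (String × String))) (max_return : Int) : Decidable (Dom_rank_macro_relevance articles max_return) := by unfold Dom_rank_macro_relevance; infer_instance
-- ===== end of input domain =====

-- B replaces A's round-robin pop/delete while-loop with a one-pass tagging (per-source rank,
-- source first-appearance index) followed by one stable sort — objective: simpler/alternative.


-- ===== PORT A =====
-- a.get("source") or "Other"  (shared by both ports; both Pythons compute it inline)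
def pvSrc (a : List (String × String)) : String :=
  match (PySem.Dict.mk a).get? "source" with
  | some s => if s == "" then "Other" else s
  | none => "Other"

-- the 'for src in list(by_source.keys()):' body (pop / del / break at max_return)
def pvInnerA (m : Int) : List String → PySem.Dict String (List (List (String × String))) →
    List (List (String × String)) →
    List (List (String × String)) × PySem.Dict String (List (List (String × String)))
  | [], d, res => (res, d)
  | src :: rest, d, res =>
    match d.getD src [] with
    | [] => pvInnerA m rest (d.erase src) res
    | x :: xs =>
      let d' := d.insert src xs
      let res' := res ++ [x]
      if m ≤ (res'.length : Int) then (res', d') else pvInnerA m rest d' res'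

-- the 'while' loop; fuel only makes it total (articles.length + 1 rounds always suffice)
def pvOuterA (m : Int) : Nat → PySem.Dict String (List (List (String × String))) →
    List (List (String × String)) → List (List (String × String))
  | 0, _, res => res
  | fuel + 1, d, res =>
    if (res.length : Int) < m ∧ (d.size ≠ 0 ∨ res ≠ []) then
      let p := pvInnerA m d.keys d res
      if m ≤ (p.1.length : Int) then p.1
      else if p.2.size = 0 then p.1
      else pvOuterA m fuel p.2 p.1
    else res

def rank_macro_relevance (articles : List (List (String × String))) (max_return : Int) :
    List (List (String × String)) :=
  if (articles.length : Int) ≤ max_return then articles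
  else
    let by_source := articles.foldl
      (fun d a => d.modify (pvSrc a) [] (fun l => l ++ [a])) PySem.Dict.empty
    let result := pvOuterA max_return (articles.length + 1) by_source []
    PySem.List.slice result none (some max_return)

-- ===== PORT B =====
def rank_macro_relevance_alt (articles : List (List (String × String))) (max_return : Int) :
    List (List (String × String)) :=
  if (articles.length : Int) ≤ max_return then articles
  else
    let st := (PySem.List.enumerate articles 0).foldl
      (fun (st : PySem.Dict String Int × PySem.Dict String Int ×
               List (Int × Int × List (String × String))) p =>
        let src := pvSrc p.2
        let firsts := if st.2.1.contains src then st.2.1 else st.2.1.insert src p.1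
        let r := st.1.getD src 0
        (st.1.insert src (r + 1), firsts, st.2.2 ++ [(r, firsts.getD src 0, p.2)]))
      (PySem.Dict.empty, PySem.Dict.empty, [])
    let keyed := PySem.List.sorted2 st.2.2 (fun t => t.1) (fun t => t.2.1)
    (PySem.List.slice keyed none (some (max 0 max_return))).map (fun t => t.2.2)

-- ===== PRECONDITION & SPEC =====
def Spec_rank_macro_relevance (articles : List (List (String × String))) (max_return : Int) (out : List (List (String × String))) : Prop := out = rank_macro_relevance_alt articles max_return
instance (articles : List (List (String × String))) (max_return : Int) (out : List (List (String × String))) : Decidable (Spec_rank_macro_relevance articles max_return out) := by unfold Spec_rank_macro_relevance; infer_instance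

-- ===== CLAIM (what is proved, stated in full; the proofs are below) =====
def Claim_equal_rank_macro_relevance : Prop := ∀ (articles : List (List (String × String))) (max_return : Int), Dom_rank_macro_relevance articles max_return → Spec_rank_macro_relevance articles max_return (rank_macro_relevance articles max_return)

-- ===== LEMMAS AND PROOFS =====

-- distinct sources in first-appearance order
def pvS (arts : List (List (String × String))) : List String :=
  PySem.Set.ofList (arts.map pvSrc)
-- the articles of one source, in order
def pvG (arts : List (List (String × String))) (s : String) : List (List (String × String)) :=
  arts.filter (fun a => pvSrc a == s)
-- round r of the round-robin
def pvRound (arts : List (List (String × String))) (r : Nat) : List (List (String × String)) :=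
  (pvS arts).filterMap (fun s => (pvG arts s)[r]?)
-- rounds r, r+1, …, arts.length concatenated
def pvCanonFrom (arts : List (List (String × String))) (r : Nat) : List (List (String × String)) :=
  (List.range' r (arts.length + 1 - r)).flatMap (pvRound arts)
-- the dict state at the start of round r
def pvQ (arts : List (List (String × String))) (r : Nat) :
    List (String × List (List (String × String))) :=
  (pvS arts).filterMap (fun s =>
    if r ≤ (pvG arts s).length then some (s, (pvG arts s).drop r) else none)
-- the tag of the article at global index i
def pvTag (arts : List (List (String × String))) (i : Nat) (a : List (String × String)) :
    Int × Int × List (String × String) :=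
  ((((arts.take i).map pvSrc).count (pvSrc a) : Int),
   ((arts.map pvSrc).idxOf (pvSrc a) : Int), a)
-- tags of a suffix starting at global index i
def pvTagsFrom (arts : List (List (String × String))) :
    List (List (String × String)) → Nat → List (Int × Int × List (String × String))
  | [], _ => []
  | a :: t, i => pvTag arts i a :: pvTagsFrom arts t (i + 1)
-- the tagged list B builds: (rank within source, first index of source, article)
def pvT (arts : List (List (String × String))) : List (Int × Int × List (String × String)) :=
  pvTagsFrom arts arts 0
-- a group tagged with ranks c, c+1, … and fixed first-index f
def pvRanked (f : Int) : List (List (String × String)) → Int → List (Int × Int × List (String × String))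
  | [], _ => []
  | a :: t, c => (c, f, a) :: pvRanked f t (c + 1)
-- tags of one source
def pvGT (arts : List (List (String × String))) (s : String) :
    List (Int × Int × List (String × String)) :=
  (pvT arts).filter (fun t => pvSrc t.2.2 == s)
-- the sorted tag list, described round by round
def pvCanonT (arts : List (List (String × String))) : List (Int × Int × List (String × String)) :=
  (List.range (arts.length + 1)).flatMap (fun r => (pvS arts).filterMap (fun s => (pvGT arts s)[r]?))

-- ---- small association-list facts used by the inner-loop lemma ----
lemma pv_getD_append_cons (P Q : List (String × List (List (String × String)))) (s : String)
    (l : List (List (String × String))) (hP : ∀ p ∈ P, p.1 ≠ s) :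
    (PySem.Dict.mk (P ++ (s, l) :: Q)).getD s [] = l := by
  simp only [PySem.Dict.getD, PySem.Dict.get?, List.find?_append]
  rw [List.find?_eq_none.2 (by intro p hp; simpa using hP p hp)]
  simp

lemma pv_erase_append_cons (P Q : List (String × List (List (String × String)))) (s : String)
    (l : List (List (String × String))) (hP : ∀ p ∈ P, p.1 ≠ s) (hQ : ∀ p ∈ Q, p.1 ≠ s) :
    (PySem.Dict.mk (P ++ (s, l) :: Q)).erase s = PySem.Dict.mk (P ++ Q) := by
  simp only [PySem.Dict.erase, List.filter_append, List.filter_cons]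
  rw [List.filter_eq_self.2 (by intro p hp; simpa using hP p hp),
      List.filter_eq_self.2 (by intro p hp; simpa using hQ p hp)]
  simp

lemma pv_insert_append_cons (P Q : List (String × List (List (String × String)))) (s : String)
    (l v : List (List (String × String))) (hP : ∀ p ∈ P, p.1 ≠ s) (hQ : ∀ p ∈ Q, p.1 ≠ s) :
    (PySem.Dict.mk (P ++ (s, l) :: Q)).insert s v = PySem.Dict.mk (P ++ (s, v) :: Q) := by
  have hc : (PySem.Dict.mk (P ++ (s, l) :: Q)).contains s = true := by
    simp [PySem.Dict.contains]
  have hmap : ∀ (L : List (String × List (List (String × String)))), (∀ p ∈ L, p.1 ≠ s) →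
      L.map (fun p => if (p.1 == s) = true then (s, v) else p) = L := by
    intro L hL
    rw [List.map_congr_left (g := id) (by intro p hp; simp [hL p hp]), List.map_id]
  rw [PySem.Dict.insert]
  simp only [hc, if_true, List.map_append, List.map_cons, hmap P hP, hmap Q hQ]
  simp

-- ---- inner loop ----
lemma pvInnerA_full (m : Int) :
    ∀ (Q P : List (String × List (List (String × String)))) (res : List (List (String × String))),
    ((P ++ Q).map Prod.fst).Nodup →
    (res.length : Int) + ((Q.filterMap (fun p => p.2.head?)).length : Int) < m →
    pvInnerA m (Q.map Prod.fst) (PySem.Dict.mk (P ++ Q)) res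
      = (res ++ Q.filterMap (fun p => p.2.head?),
         PySem.Dict.mk (P ++ Q.filterMap (fun p => if p.2.isEmpty then none else some (p.1, p.2.tail)))) := by
  intro Q
  induction Q with
  | nil => intro P res _ _; simp [pvInnerA]
  | cons q Q ih =>
    intro P res hnd hlt
    obtain ⟨s, l⟩ := q
    have hnd' : (P.map Prod.fst ++ s :: Q.map Prod.fst).Nodup := by simpa using hnd
    have hdisj := List.disjoint_of_nodup_append hnd'
    have hP : ∀ p ∈ P, p.1 ≠ s := fun p hp he =>
      hdisj (List.mem_map_of_mem hp) (by simp [he])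
    have hs : s ∉ Q.map Prod.fst := (List.nodup_cons.mp (hnd'.of_append_right)).1
    have hQ : ∀ p ∈ Q, p.1 ≠ s := fun p hp he => hs (he ▸ List.mem_map_of_mem hp)
    simp only [List.map_cons, pvInnerA]
    rw [pv_getD_append_cons P Q s l hP]
    cases l with
    | nil =>
      dsimp only
      rw [pv_erase_append_cons P Q s [] hP hQ]
      have := ih P res (by
        simp only [List.map_append, List.map_cons, List.nodup_append, List.nodup_cons] at hnd ⊢
        exact ⟨hnd.1, hnd.2.1.2, fun a ha b hb => hnd.2.2 a ha b (by simp [hb])⟩)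
        (by simpa using hlt)
      simpa using this
    | cons x xs =>
      dsimp only
      rw [pv_insert_append_cons P Q s (x::xs) xs hP hQ]
      simp only [List.filterMap_cons, List.head?_cons, List.length_cons] at hlt ⊢
      have hlt' : ¬ (m ≤ ((res ++ [x]).length : Int)) := by
        simp only [List.length_append, List.length_cons, List.length_nil]
        push_cast
        omega
      simp only [if_neg hlt']
      have hkeys : ((P ++ [(s, xs)] ++ Q).map Prod.fst) = ((P ++ (s, x::xs) :: Q).map Prod.fst) := by
        simp
      have := ih (P ++ [(s, xs)]) (res ++ [x]) (by rw [hkeys]; exact hnd)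
        (by simp only [List.length_append, List.length_cons, List.length_nil]; push_cast at hlt ⊢; omega)
      simp only [List.append_assoc] at this
      simp only [List.cons_append, List.nil_append] at this
      rw [this]
      simp

lemma pvInnerA_break (m : Int) :
    ∀ (Q P : List (String × List (List (String × String)))) (res : List (List (String × String))),
    ((P ++ Q).map Prod.fst).Nodup →
    (res.length : Int) < m →
    m ≤ (res.length : Int) + ((Q.filterMap (fun p => p.2.head?)).length : Int) →
    (pvInnerA m (Q.map Prod.fst) (PySem.Dict.mk (P ++ Q)) res).1
      = res ++ (Q.filterMap (fun p => p.2.head?)).take (m - res.length).toNat := by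
  intro Q
  induction Q with
  | nil => intro P res _ hlt hle; exfalso; simp at hle; omega
  | cons q Q ih =>
    intro P res hnd hlt hle
    obtain ⟨s, l⟩ := q
    have hnd' : (P.map Prod.fst ++ s :: Q.map Prod.fst).Nodup := by simpa using hnd
    have hdisj := List.disjoint_of_nodup_append hnd'
    have hP : ∀ p ∈ P, p.1 ≠ s := fun p hp he =>
      hdisj (List.mem_map_of_mem hp) (by simp [he])
    have hs : s ∉ Q.map Prod.fst := (List.nodup_cons.mp (hnd'.of_append_right)).1
    have hQ : ∀ p ∈ Q, p.1 ≠ s := fun p hp he => hs (he ▸ List.mem_map_of_mem hp)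
    simp only [List.map_cons, pvInnerA]
    rw [pv_getD_append_cons P Q s l hP]
    cases l with
    | nil =>
      dsimp only
      rw [pv_erase_append_cons P Q s [] hP hQ]
      have := ih P res (by
        simp only [List.map_append, List.map_cons, List.nodup_append, List.nodup_cons] at hnd ⊢
        exact ⟨hnd.1, hnd.2.1.2, fun a ha b hb => hnd.2.2 a ha b (by simp [hb])⟩)
        hlt (by simpa using hle)
      simpa using this
    | cons x xs =>
      dsimp only
      rw [pv_insert_append_cons P Q s (x::xs) xs hP hQ]
      simp only [List.filterMap_cons, List.head?_cons, List.length_cons] at hle ⊢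
      by_cases hbr : m ≤ ((res ++ [x]).length : Int)
      · simp only [if_pos hbr]
        have h1 : (m - (res.length : Int)).toNat = 1 := by
          simp only [List.length_append, List.length_cons, List.length_nil] at hbr
          push_cast at hbr hlt ⊢
          omega
        simp [h1]
      · simp only [if_neg hbr]
        have hkeys : ((P ++ [(s, xs)] ++ Q).map Prod.fst) = ((P ++ (s, x::xs) :: Q).map Prod.fst) := by
          simp
        have := ih (P ++ [(s, xs)]) (res ++ [x]) (by rw [hkeys]; exact hnd)
          (by simp only [List.length_append, List.length_cons, List.length_nil] at hbr ⊢; push_cast at hbr ⊢; omega)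
          (by simp only [List.length_append, List.length_cons, List.length_nil] at hle ⊢; push_cast at hle ⊢; omega)
        simp only [List.append_assoc, List.cons_append, List.nil_append] at this
        rw [this]
        have hk : (m - (res.length : Int)).toNat = ((m - (((res ++ [x]).length : Nat) : Int)).toNat) + 1 := by
          simp only [List.length_append, List.length_cons, List.length_nil]
          omega
        rw [hk, List.take_succ_cons]

-- ---- state identities ----
lemma pvQ_zero (arts : List (List (String × String))) :
    pvQ arts 0 = (pvS arts).map (fun s => (s, pvG arts s)) := by
  simp [pvQ]

lemma pv_init_items (arts : List (List (String × String))) :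
    (arts.foldl (fun d a => d.modify (pvSrc a) [] (fun l => l ++ [a])) PySem.Dict.empty).items
      = (pvS arts).map (fun s => (s, pvG arts s)) := by
  have hkeys : (arts.foldl (fun d a => d.modify (pvSrc a) [] (fun l => l ++ [a]))
      PySem.Dict.empty).keys = pvS arts := by
    rw [PySem.Dict.keys_foldl_modify_key arts pvSrc [] (fun _ a l => l ++ [a]) PySem.Dict.empty]
    rfl
  have hnd : (arts.foldl (fun d a => d.modify (pvSrc a) [] (fun l => l ++ [a]))
      PySem.Dict.empty).keys.Nodup := by
    exact PySem.Dict.nodup_keys_foldl_modify_key arts pvSrc [] (fun _ a l => l ++ [a])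
      PySem.Dict.empty (by simp [PySem.Dict.empty])
  have hgetD : ∀ s, (arts.foldl (fun d a => d.modify (pvSrc a) [] (fun l => l ++ [a]))
      PySem.Dict.empty).getD s [] = pvG arts s := by
    intro s
    have hfold : arts.foldl (fun d a => d.modify (pvSrc a) [] (fun l => l ++ [a]))
        PySem.Dict.empty
        = (arts.map (fun a => (pvSrc a, a))).foldl
            (fun d p => d.modify p.1 [] (fun l => l ++ [p.2])) PySem.Dict.empty := by
      rw [List.foldl_map]
    rw [hfold, PySem.Dict.getD_foldl_modify_append]
    simp [pvG, List.filter_map, Function.comp_def]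
  rw [PySem.Dict.items_eq_map_keys _ hnd [], hkeys]
  exact List.map_congr_left (fun s _ => by rw [hgetD s])

lemma pvQ_keys (arts : List (List (String × String))) (r : Nat) :
    (pvQ arts r).map Prod.fst = (pvS arts).filter (fun s => r ≤ (pvG arts s).length) := by
  unfold pvQ
  induction pvS arts with
  | nil => simp
  | cons a t ih =>
    simp only [List.filterMap_cons, List.filter_cons]
    by_cases h : r ≤ (pvG arts a).length
    · simp [h, ih]
    · simp [h, ih]

lemma pvQ_keys_nodup (arts : List (List (String × String))) (r : Nat) :
    ((pvQ arts r).map Prod.fst).Nodup := by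
  rw [pvQ_keys]
  exact (PySem.Set.nodup_ofList _).filter _

lemma pvQ_emitted (arts : List (List (String × String))) (r : Nat) :
    (pvQ arts r).filterMap (fun p => p.2.head?) = pvRound arts r := by
  unfold pvQ pvRound
  rw [List.filterMap_filterMap]
  refine List.filterMap_congr (fun s _ => ?_)
  by_cases h : r ≤ (pvG arts s).length
  · simp only [if_pos h, Option.bind_some]
    rw [List.head?_drop]
  · simp only [if_neg h]
    rw [List.getElem?_eq_none (by omega)]
    rfl

lemma pvQ_step (arts : List (List (String × String))) (r : Nat) :
    (pvQ arts r).filterMap (fun p => if p.2.isEmpty then none else some (p.1, p.2.tail))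
      = pvQ arts (r + 1) := by
  unfold pvQ
  rw [List.filterMap_filterMap]
  refine List.filterMap_congr (fun s _ => ?_)
  by_cases h : r ≤ (pvG arts s).length
  · simp only [if_pos h, Option.bind_some]
    by_cases h2 : r + 1 ≤ (pvG arts s).length
    · rw [if_pos h2]
      have hne : ((pvG arts s).drop r).isEmpty = false := by
        simp [List.drop_eq_nil_iff]
        omega
      simp [hne, List.tail_drop]
    · rw [if_neg h2]
      have hne : ((pvG arts s).drop r).isEmpty = true := by
        simp [List.drop_eq_nil_iff]
        omega
      simp [hne]
  · rw [if_neg h, if_neg (by omega)]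
    simp

lemma pvG_length_le (arts : List (List (String × String))) (s : String) :
    (pvG arts s).length ≤ arts.length := List.length_filter_le _ _

lemma pvQ_eq_nil_iff (arts : List (List (String × String))) (r : Nat) :
    pvQ arts r = [] ↔ ∀ s ∈ pvS arts, (pvG arts s).length < r := by
  unfold pvQ
  rw [List.filterMap_eq_nil_iff]
  constructor
  · intro h s hs
    have := h s hs
    by_cases hr : r ≤ (pvG arts s).length
    · simp [hr] at this
    · omega
  · intro h s hs
    rw [if_neg (by have := h s hs; omega)]

lemma pvRound_eq_nil_of (arts : List (List (String × String))) (r j : Nat)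
    (h : ∀ s ∈ pvS arts, (pvG arts s).length < r) (hj : r ≤ j) :
    pvRound arts j = [] := by
  unfold pvRound
  rw [List.filterMap_eq_nil_iff]
  intro s hs
  exact List.getElem?_eq_none (by have := h s hs; omega)

lemma pvCanonFrom_succ (arts : List (List (String × String))) (r : Nat)
    (hr : r ≤ arts.length) :
    pvCanonFrom arts r = pvRound arts r ++ pvCanonFrom arts (r + 1) := by
  unfold pvCanonFrom
  have h1 : arts.length + 1 - r = (arts.length + 1 - (r + 1)) + 1 := by omega
  rw [h1, List.range'_succ, List.flatMap_cons]

lemma pvCanonFrom_eq_nil (arts : List (List (String × String))) (r : Nat)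
    (h : ∀ s ∈ pvS arts, (pvG arts s).length < r) :
    pvCanonFrom arts r = [] := by
  unfold pvCanonFrom
  rw [List.flatMap_eq_nil_iff]
  intro j hj
  rw [List.mem_range'] at hj
  obtain ⟨i, _, hji⟩ := hj
  exact pvRound_eq_nil_of arts r j h (by omega)

-- ---- outer loop ----
lemma pvOuterA_spec (arts : List (List (String × String))) (m : Int) :
    ∀ (fuel r : Nat) (res : List (List (String × String))),
    arts.length + 1 ≤ fuel + r →
    pvOuterA m fuel (PySem.Dict.mk (pvQ arts r)) res
      = res ++ (pvCanonFrom arts r).take (m - res.length).toNat := by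
  intro fuel
  induction fuel with
  | zero =>
    intro r res hle
    have hbig : ∀ s ∈ pvS arts, (pvG arts s).length < r := fun s _ => by
      have := pvG_length_le arts s; omega
    rw [pvCanonFrom_eq_nil arts r hbig]
    simp [pvOuterA]
  | succ fuel ih =>
    intro r res hle
    simp only [pvOuterA]
    by_cases hcond : (res.length : Int) < m ∧
        ((PySem.Dict.mk (pvQ arts r)).size ≠ 0 ∨ res ≠ [])
    · rw [if_pos hcond]
      by_cases hQnil : pvQ arts r = []
      · have hcanon : pvCanonFrom arts r = []  :=
          pvCanonFrom_eq_nil arts r ((pvQ_eq_nil_iff arts r).1 hQnil)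
        have hsz : (PySem.Dict.mk (pvQ arts r)).size = 0 := by
          simp [PySem.Dict.size, hQnil]
        rcases hcond.2 with h | h
        · exact absurd hsz h
        · simp only [hQnil, hcanon]
          have hstep : pvInnerA m ([] : List String) (PySem.Dict.mk []) res
              = (res, PySem.Dict.mk ([] : List (String × List (List (String × String))))) := by
            simp [pvInnerA]
          simp only [PySem.Dict.keys, List.map_nil, hstep]
          rw [if_neg (by omega : ¬ m ≤ ((res.length : Nat) : Int))]
          simp
          intro hc
          exact absurd rfl hc
      · have hrN : r ≤ arts.length := by
          have := (pvQ_eq_nil_iff arts r).not.1 hQnil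
          push Not at this
          obtain ⟨s, hs, hlen⟩ := this
          have := pvG_length_le arts s
          omega
        have hsplit := pvCanonFrom_succ arts r hrN
        have hkeys : (PySem.Dict.mk (pvQ arts r)).keys = (pvQ arts r).map Prod.fst := rfl
        have hnd : (([] ++ pvQ arts r).map Prod.fst).Nodup := by
          simpa using pvQ_keys_nodup arts r
        by_cases hbr : m ≤ (res.length : Int) + ((pvRound arts r).length : Int)
        · have hinner := pvInnerA_break m (pvQ arts r) [] res hnd hcond.1
            (by rw [pvQ_emitted]; exact hbr)
          rw [pvQ_emitted] at hinner
          simp only [List.nil_append] at hinner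
          have hklen : ((m - (res.length : Int)).toNat) ≤ (pvRound arts r).length := by omega
          have hlen1 : (((pvInnerA m ((pvQ arts r).map Prod.fst)
              (PySem.Dict.mk (pvQ arts r)) res).1.length : Int)) = m := by
            rw [hinner]
            simp only [List.length_append, List.length_take]
            push_cast
            omega
          rw [hkeys, if_pos (le_of_eq hlen1.symm), hinner, hsplit]
          rw [List.take_append_of_le_length hklen]
        · push Not at hbr
          have hinner := pvInnerA_full m (pvQ arts r) [] res hnd
            (by rw [pvQ_emitted]; omega)
          rw [pvQ_emitted, pvQ_step] at hinner
          simp only [List.nil_append] at hinner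
          rw [hkeys, hinner]
          have hlen2 : ¬ (m ≤ ((res ++ pvRound arts r).length : Int)) := by
            simp only [List.length_append]
            push_cast
            omega
          rw [if_neg hlen2]
          by_cases hQ2 : (PySem.Dict.mk (pvQ arts (r + 1))).size = 0
          · have hQ2' : pvQ arts (r + 1) = [] := by
              simpa [PySem.Dict.size] using hQ2
            have hcanon2 : pvCanonFrom arts (r + 1) = [] :=
              pvCanonFrom_eq_nil arts (r + 1) ((pvQ_eq_nil_iff arts (r + 1)).1 hQ2')
            rw [if_pos hQ2, hsplit, hcanon2, List.append_nil]
            rw [List.take_of_length_le (by omega)]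
          · rw [if_neg hQ2]
            rw [ih (r + 1) (res ++ pvRound arts r) (by omega), hsplit]
            rw [List.take_append]
            have harith : ((m - (res.length : Int)).toNat) - (pvRound arts r).length
                = (m - (((res ++ pvRound arts r).length : Nat) : Int)).toNat := by
              simp only [List.length_append]
              push_cast
              omega
            rw [harith, List.take_of_length_le (by omega : (pvRound arts r).length ≤ (m - (res.length : Int)).toNat)]
            simp
    · rw [if_neg hcond]
      rw [Classical.not_and_iff_not_or_not] at hcond
      rcases hcond with h | h
      · have hm : (m - (res.length : Int)).toNat = 0 := by omega
        rw [hm, List.take_zero, List.append_nil]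
      · rw [not_or] at h
        obtain ⟨hsz, _⟩ := h
        rw [Classical.not_not] at hsz
        have hQnil : pvQ arts r = [] := by simpa [PySem.Dict.size] using hsz
        rw [pvCanonFrom_eq_nil arts r ((pvQ_eq_nil_iff arts r).1 hQnil)]
        simp

-- ---- B: the fold builds pvT ----
lemma pvB_fold_aux (arts : List (List (String × String))) :
    ∀ (suf pre : List (List (String × String))), arts = pre ++ suf →
    ∀ (cd fd : PySem.Dict String Int) (acc : List (Int × Int × List (String × String))),
    (∀ s, cd.getD s 0 = ((pre.map pvSrc).count s : Int)) →
    (∀ s, fd.contains s = decide (s ∈ pre.map pvSrc)) →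
    (∀ s ∈ pre.map pvSrc, fd.getD s 0 = (((arts.map pvSrc).idxOf s : Nat) : Int)) →
    ((PySem.List.enumerate suf (pre.length : Int)).foldl
      (fun (st : PySem.Dict String Int × PySem.Dict String Int ×
               List (Int × Int × List (String × String))) p =>
        let src := pvSrc p.2
        let firsts := if st.2.1.contains src then st.2.1 else st.2.1.insert src p.1
        let r := st.1.getD src 0
        (st.1.insert src (r + 1), firsts, st.2.2 ++ [(r, firsts.getD src 0, p.2)]))
      (cd, fd, acc)).2.2 = acc ++ pvTagsFrom arts suf pre.length := by
  intro suf
  induction suf with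
  | nil => intro pre _ cd fd acc _ _ _; simp [PySem.List.enumerate, pvTagsFrom]
  | cons a t ih =>
    intro pre harts cd fd acc h1 h2 h3
    rw [PySem.List.enumerate_cons]
    simp only [List.foldl_cons]
    have htake : arts.take pre.length = pre := by
      rw [harts, List.take_left]
    -- the stored first index is the global idxOf
    have hf : (if fd.contains (pvSrc a) then fd else fd.insert (pvSrc a) (pre.length : Int)).getD
        (pvSrc a) 0 = (((arts.map pvSrc).idxOf (pvSrc a) : Nat) : Int) := by
      by_cases hc : fd.contains (pvSrc a) = true
      · rw [if_pos hc]
        exact h3 _ (by have := h2 (pvSrc a); rw [hc] at this; exact of_decide_eq_true this.symm)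
      · rw [if_neg hc]
        rw [PySem.Dict.getD_insert_self]
        have hnm : pvSrc a ∉ pre.map pvSrc := fun hmem =>
          hc (by rw [h2]; simpa using hmem)
        have : (arts.map pvSrc).idxOf (pvSrc a) = pre.length := by
          rw [harts, List.map_append, List.map_cons]
          rw [List.idxOf_append_of_notMem hnm]
          simp [List.idxOf_cons_self]
        rw [this]
      -- goal closed in both branches
    have hrank : cd.getD (pvSrc a) 0 = (((arts.take pre.length).map pvSrc).count (pvSrc a) : Int) := by
      rw [htake]; exact h1 _
    -- recursive call with pre ++ [a]
    have harts' : arts = (pre ++ [a]) ++ t := by rw [harts]; simp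
    have hlen' : ((pre ++ [a]).length : Int) = (pre.length : Int) + 1 := by
      simp
    have := ih (pre ++ [a]) harts'
      (cd.insert (pvSrc a) (cd.getD (pvSrc a) 0 + 1))
      (if fd.contains (pvSrc a) then fd else fd.insert (pvSrc a) (pre.length : Int))
      (acc ++ [(cd.getD (pvSrc a) 0,
        (if fd.contains (pvSrc a) then fd else fd.insert (pvSrc a) (pre.length : Int)).getD (pvSrc a) 0, a)])
      (by
        intro s
        by_cases hs : s = pvSrc a
        · subst hs
          rw [PySem.Dict.getD_insert_self, h1]
          simp [List.map_append, List.count_append]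
        · rw [PySem.Dict.getD_insert_of_ne _ _ _ hs, h1]
          simp only [List.map_append, List.map_cons, List.map_nil, List.count_append]
          have hz : List.count s [pvSrc a] = 0 := by
            rw [List.count_eq_zero]
            intro hmem
            rw [List.mem_singleton] at hmem
            exact hs hmem
          rw [hz]
          omega)
      (by
        intro s
        by_cases hc : fd.contains (pvSrc a) = true
        · rw [if_pos hc, h2]
          have hmem : pvSrc a ∈ pre.map pvSrc := by
            have := h2 (pvSrc a); rw [hc] at this; exact of_decide_eq_true this.symm
          by_cases hs : s = pvSrc a
          · subst hs; simp [hmem]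
          · simp only [List.map_append, List.map_cons, List.map_nil, List.mem_append,
              List.mem_cons, List.not_mem_nil, or_false]
            congr 1
            simp [hs]
        · rw [if_neg hc]
          rw [PySem.Dict.contains_insert, h2]
          by_cases hs : s = pvSrc a
          · subst hs; simp
          · simp only [List.map_append, List.map_cons, List.map_nil, List.mem_append,
              List.mem_cons, List.not_mem_nil, or_false]
            have : (s == pvSrc a) = false := by simp [hs]
            rw [this]
            simp [hs])
      (by
        intro s hs
        rw [List.map_append, List.map_cons, List.map_nil, List.mem_append] at hs
        by_cases hseq : s = pvSrc a
        · subst hseq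
          exact hf
        · have hs' : s ∈ pre.map pvSrc := by
            rcases hs with h | h
            · exact h
            · simp at h; exact absurd h hseq
          by_cases hc : fd.contains (pvSrc a) = true
          · rw [if_pos hc]; exact h3 s hs'
          · rw [if_neg hc]
            rw [PySem.Dict.getD_insert_of_ne _ _ _ hseq]
            exact h3 s hs')
    simp only [List.length_append, List.length_cons, List.length_nil] at this
    rw [show (pre.length : Int) + 1 = ((pre.length + 1 : Nat) : Int) by push_cast; ring]
    rw [this]
    simp only [pvTagsFrom, pvTag]
    rw [hrank, hf, htake]
    simp

lemma pvB_fold (arts : List (List (String × String))) :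
    ((PySem.List.enumerate arts 0).foldl
      (fun (st : PySem.Dict String Int × PySem.Dict String Int ×
               List (Int × Int × List (String × String))) p =>
        let src := pvSrc p.2
        let firsts := if st.2.1.contains src then st.2.1 else st.2.1.insert src p.1
        let r := st.1.getD src 0
        (st.1.insert src (r + 1), firsts, st.2.2 ++ [(r, firsts.getD src 0, p.2)]))
      (PySem.Dict.empty, PySem.Dict.empty, [])).2.2 = pvT arts := by
  have := pvB_fold_aux arts arts [] rfl PySem.Dict.empty PySem.Dict.empty []
    (by intro s; simp [PySem.Dict.getD_empty])
    (by intro s; simp [PySem.Dict.contains_empty])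
    (by intro s hs; simp at hs)
  simpa [pvT] using this

-- ---- B: the sort, characterised ----
lemma pvTagsFrom_filter (arts : List (List (String × String))) (s : String) :
    ∀ (suf pre : List (List (String × String))), arts = pre ++ suf →
    (pvTagsFrom arts suf pre.length).filter (fun t => pvSrc t.2.2 == s)
      = pvRanked ((arts.map pvSrc).idxOf s : Int) (suf.filter (fun a => pvSrc a == s))
          (((pre.map pvSrc).count s : Int)) := by
  intro suf
  induction suf with
  | nil => intro pre _; simp [pvTagsFrom, pvRanked]
  | cons a t ih =>
    intro pre harts
    have harts' : arts = (pre ++ [a]) ++ t := by rw [harts]; simp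
    have := ih (pre ++ [a]) harts'
    simp only [List.length_append, List.length_cons, List.length_nil] at this
    simp only [pvTagsFrom, List.filter_cons]
    by_cases hsa : pvSrc a = s
    · have hb : (pvSrc (pvTag arts pre.length a).2.2 == s) = true := by
        simp [pvTag, hsa]
      rw [hb]
      simp only [if_pos (by simp [hsa] : (pvSrc a == s) = true)]
      rw [this]
      have htake : arts.take pre.length = pre := by rw [harts]; exact List.take_left
      simp only [pvRanked, pvTag, htake, hsa, if_true]
      congr 2
      simp only [List.map_append, List.map_cons, List.map_nil, List.count_append]
      rw [hsa]
      have hone : List.count s [s] = 1 := by simp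
      rw [hone]
      push_cast
      ring
    · have hb : (pvSrc (pvTag arts pre.length a).2.2 == s) = false := by
        simp [pvTag, hsa]
      have hb2 : (pvSrc a == s) = false := by simp [hsa]
      rw [hb, hb2]
      simp only [Bool.false_eq_true, if_false]
      rw [this]
      congr 2
      simp only [List.map_append, List.map_cons, List.map_nil, List.count_append]
      have hz : List.count s [pvSrc a] = 0 := by
        rw [List.count_eq_zero]
        intro hmem
        rw [List.mem_singleton] at hmem
        exact hsa hmem.symm
      rw [hz]
      omega

lemma pvGT_char (arts : List (List (String × String))) (s : String) :
    pvGT arts s = pvRanked ((arts.map pvSrc).idxOf s : Int) (pvG arts s) 0 := by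
  have := pvTagsFrom_filter arts s arts [] rfl
  simpa [pvGT, pvT, pvG] using this

lemma pvRanked_getElem? (f : Int) :
    ∀ (l : List (List (String × String))) (c : Int) (j : Nat),
    (pvRanked f l c)[j]? = (l[j]?).map (fun a => (c + (j : Int), f, a)) := by
  intro l
  induction l with
  | nil => intro c j; simp [pvRanked]
  | cons a t ih =>
    intro c j
    cases j with
    | zero => simp [pvRanked]
    | succ j =>
      simp only [pvRanked, List.getElem?_cons_succ, ih (c + 1) j]
      cases t[j]? with
      | none => simp
      | some b => simp; ring

lemma pvGT_getElem? (arts : List (List (String × String))) (s : String) (r : Nat) :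
    (pvGT arts s)[r]? = ((pvG arts s)[r]?).map
      (fun a => ((r : Int), ((arts.map pvSrc).idxOf s : Int), a)) := by
  rw [pvGT_char, pvRanked_getElem?]
  simp

lemma pvTagsFrom_third (arts : List (List (String × String))) :
    ∀ (suf : List (List (String × String))) (i : Nat),
    (pvTagsFrom arts suf i).map (fun t => t.2.2) = suf := by
  intro suf
  induction suf with
  | nil => intro i; simp [pvTagsFrom]
  | cons a t ih => intro i; simp [pvTagsFrom, pvTag, ih]

lemma pv_idxOf_pairwise (l : List String) :
    (PySem.Set.ofList l).Pairwise (fun a b => l.idxOf a < l.idxOf b) := by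
  induction l using List.reverseRecOn with
  | nil => simp [PySem.Set.ofList]
  | append_singleton l x ih =>
    have hof : PySem.Set.ofList (l ++ [x]) = PySem.Set.add (PySem.Set.ofList l) x := by
      rw [PySem.Set.ofList_eq_foldl, PySem.Set.ofList_eq_foldl, List.foldl_append]
      rfl
    have hmem : ∀ a ∈ PySem.Set.ofList l, a ∈ l := fun a ha =>
      (PySem.Set.mem_ofList _ _).1 ha
    have hidx : ∀ a ∈ PySem.Set.ofList l, (l ++ [x]).idxOf a = l.idxOf a := fun a ha =>
      List.idxOf_append_of_mem (hmem a ha)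
    have hpw : (PySem.Set.ofList l).Pairwise (fun a b => (l ++ [x]).idxOf a < (l ++ [x]).idxOf b) := by
      refine ih.imp_of_mem ?_
      intro a b ha hb h
      rw [hidx a ha, hidx b hb]
      exact h
    rw [hof]
    unfold PySem.Set.add
    by_cases hc : PySem.Set.contains (PySem.Set.ofList l) x
    · rw [if_pos hc]; exact hpw
    · rw [if_neg hc]
      have hxl : x ∉ l := by
        intro hxl
        exact hc (by simpa [PySem.Set.contains] using (PySem.Set.mem_ofList l x).2 hxl)
      rw [List.pairwise_append]
      refine ⟨hpw, by simp, ?_⟩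
      intro a ha y hy
      rw [List.mem_singleton] at hy
      subst hy
      rw [hidx a ha, List.idxOf_append_of_notMem hxl]
      have : l.idxOf a < l.length := List.idxOf_lt_length_of_mem (hmem a ha)
      simp [List.idxOf_cons_self]
      omega

-- sorted2 is sort by the lexicographic pair key
lemma pv_sorted2_eq_sorted_lex (xs : List (Int × Int × List (String × String))) :
    PySem.List.sorted2 xs (fun t => t.1) (fun t => t.2.1)
      = PySem.List.sorted xs (fun t => (toLex (t.1, t.2.1) : Lex (Int × Int))) := by
  unfold PySem.List.sorted2 PySem.List.sorted
  dsimp only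
  congr 1
  funext acc x
  congr 1
  funext a b
  simp only [Bool.false_eq_true, if_false]
  have hlex : ((toLex (a.1, a.2.1) : Lex (Int × Int)) < toLex (b.1, b.2.1))
      ↔ (a.1 < b.1 ∨ (a.1 = b.1 ∧ a.2.1 < b.2.1)) := Prod.Lex.lt_iff
  rw [Bool.eq_iff_iff]
  simp only [Bool.or_eq_true, Bool.and_eq_true, Bool.not_eq_true',
    decide_eq_true_eq, decide_eq_false_iff_not, hlex]
  omega

lemma pv_range_filterMap_getElem? {γ : Type} (l : List γ) (n : Nat) (hn : l.length ≤ n) :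
    (List.range n).filterMap (fun i => l[i]?) = l := by
  have key : ∀ k, (List.range k).filterMap (fun i => l[i]?) = l.take k := by
    intro k
    induction k with
    | zero => simp
    | succ k ih =>
      rw [List.range_succ, List.filterMap_append, ih, List.take_add_one]
      cases h : l[k]? <;> simp [h]
  rw [key n, List.take_of_length_le hn]

lemma pv_flatMap_append_perm {α γ : Type} (B : List α) (f g : α → List γ) :
    (B.flatMap (fun b => f b ++ g b)).Perm (B.flatMap f ++ B.flatMap g) := by
  induction B with
  | nil => simp
  | cons b B ih =>
    simp only [List.flatMap_cons]
    refine ((ih.append_left (f b ++ g b)).trans ?_)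
    rw [List.append_assoc]
    refine List.Perm.trans ((?_ : (g b ++ (B.flatMap f ++ B.flatMap g)).Perm
      (B.flatMap f ++ (g b ++ B.flatMap g))).append_left (f b)) (List.Perm.of_eq ?_)
    · rw [← List.append_assoc, ← List.append_assoc]
      exact (List.perm_append_comm).append_right _
    · rw [List.append_assoc]

lemma pv_flatMap_filterMap_comm {α β γ : Type} (A : List α) (B : List β) (g : α → β → Option γ) :
    (A.flatMap (fun a => B.filterMap (fun b => g a b))).Perm
      (B.flatMap (fun b => A.filterMap (fun a => g a b))) := by
  induction A with
  | nil => simp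
  | cons a A ih =>
    simp only [List.flatMap_cons, List.filterMap_cons]
    have h1 : (B.flatMap (fun b => match g a b with
        | none => A.filterMap (fun a => g a b)
        | some c => c :: A.filterMap (fun a => g a b))).Perm
        (B.flatMap (fun b => (g a b).toList ++ A.filterMap (fun a => g a b))) := by
      apply List.Perm.of_eq
      refine List.flatMap_congr (fun b _ => ?_)
      cases g a b <;> simp
    have h2 := pv_flatMap_append_perm B (fun b => (g a b).toList) (fun b => A.filterMap (fun a => g a b))
    have h3 : B.flatMap (fun b => (g a b).toList) = B.filterMap (g a) := by
      rw [List.filterMap_eq_flatMap_toList]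
    refine List.Perm.trans ?_ (h1.symm)
    refine List.Perm.trans ?_ h2.symm
    rw [h3]
    exact ih.append_left _

lemma pv_perm_flatMap_filter {γ : Type} (key : γ → String) :
    ∀ (S : List String) (L : List γ), S.Nodup → (∀ x ∈ L, key x ∈ S) →
    (S.flatMap (fun s => L.filter (fun x => key x == s))).Perm L := by
  intro S
  induction S with
  | nil =>
    intro L _ hcov
    cases L with
    | nil => simp
    | cons x t => exact absurd (hcov x (by simp)) (by simp)
  | cons s S ih =>
    intro L hnd hcov
    simp only [List.flatMap_cons]
    have hS : s ∉ S := (List.nodup_cons.mp hnd).1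
    have hcong : ∀ s' ∈ S, L.filter (fun x => key x == s')
        = (L.filter (fun x => !(key x == s))).filter (fun x => key x == s') := by
      intro s' hs'
      rw [List.filter_filter]
      refine (List.filter_congr ?_)
      intro x _
      by_cases hk : key x = s'
      · have h1 : (key x == s') = true := by simp [hk]
        have h2 : (key x == s) = false := by
          simp only [beq_eq_false_iff_ne, ne_eq, hk]
          intro he
          exact hS (he ▸ hs')
        simp [h1, h2]
      · have h1 : (key x == s') = false := by simp [hk]
        simp [h1]
    have hstep : S.flatMap (fun s' => L.filter (fun x => key x == s'))
        = S.flatMap (fun s' => (L.filter (fun x => !(key x == s))).filter (fun x => key x == s')) := by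
      exact List.flatMap_congr hcong
    have hihcov : ∀ x ∈ L.filter (fun x => !(key x == s)), key x ∈ S := by
      intro x hx
      rw [List.mem_filter] at hx
      rcases List.mem_cons.mp (hcov x hx.1) with h | h
      · exfalso
        have := hx.2
        rw [h] at this
        simp at this
      · exact h
    have hperm := ih (L.filter (fun x => !(key x == s))) (List.nodup_cons.mp hnd).2 hihcov
    rw [hstep]
    exact ((hperm.append_left _).trans (List.filter_append_perm _ L))

lemma pvTagsFrom_length (arts : List (List (String × String))) :
    ∀ (suf : List (List (String × String))) (i : Nat), (pvTagsFrom arts suf i).length = suf.length := by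
  intro suf
  induction suf with
  | nil => intro i; simp [pvTagsFrom]
  | cons a t ih => intro i; simp [pvTagsFrom, ih]

lemma pvGT_length_le (arts : List (List (String × String))) (s : String) :
    (pvGT arts s).length ≤ arts.length := by
  have h1 : (pvGT arts s).length ≤ (pvT arts).length := List.length_filter_le _ _
  have h2 : (pvT arts).length = arts.length := pvTagsFrom_length arts arts 0
  omega

lemma pv_canonT_perm (arts : List (List (String × String))) :
    (pvCanonT arts).Perm (pvT arts) := by
  unfold pvCanonT
  have h1 : ∀ s, (List.range (arts.length + 1)).filterMap (fun r => (pvGT arts s)[r]?)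
      = pvGT arts s := fun s =>
    pv_range_filterMap_getElem? _ _ (by have := pvGT_length_le arts s; omega)
  have hcomm := pv_flatMap_filterMap_comm (List.range (arts.length + 1)) (pvS arts)
    (fun r s => (pvGT arts s)[r]?)
  refine hcomm.trans ?_
  have hrw : (pvS arts).flatMap (fun s => (List.range (arts.length + 1)).filterMap
      (fun r => (pvGT arts s)[r]?)) = (pvS arts).flatMap (fun s => pvGT arts s) := by
    exact List.flatMap_congr (fun s _ => h1 s)
  rw [hrw]
  have hcov : ∀ t ∈ pvT arts, pvSrc t.2.2 ∈ pvS arts := by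
    intro t ht
    have h3 : t.2.2 ∈ arts := by
      have := pvTagsFrom_third arts arts 0
      rw [pvT] at ht
      rw [← this]
      exact List.mem_map_of_mem ht
    exact (PySem.Set.mem_ofList _ _).2 (List.mem_map_of_mem h3)
  exact pv_perm_flatMap_filter (fun t => pvSrc t.2.2) (pvS arts) (pvT arts)
    (PySem.Set.nodup_ofList _) hcov

lemma pv_mem_block (arts : List (List (String × String))) (r : Nat)
    (x : Int × Int × List (String × String))
    (hx : x ∈ (pvS arts).filterMap (fun s => (pvGT arts s)[r]?)) :
    x.1 = (r : Int) := by
  rw [List.mem_filterMap] at hx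
  obtain ⟨s, _, hs⟩ := hx
  rw [pvGT_getElem? arts s r] at hs
  cases h : (pvG arts s)[r]? with
  | none => rw [h] at hs; simp at hs
  | some a =>
    rw [h] at hs
    simp only [Option.map_some] at hs
    rw [← Option.some.inj hs]

lemma pv_canonT_pairwise (arts : List (List (String × String))) :
    (pvCanonT arts).Pairwise
      (fun a b => (toLex (a.1, a.2.1) : Lex (Int × Int)) < toLex (b.1, b.2.1)) := by
  unfold pvCanonT
  rw [List.flatMap_def, List.pairwise_flatten]
  refine ⟨?_, ?_⟩
  · intro l hl
    rw [List.mem_map] at hl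
    obtain ⟨r, _, hr⟩ := hl
    rw [← hr, List.pairwise_filterMap]
    have hpw := pv_idxOf_pairwise (arts.map pvSrc)
    refine hpw.imp ?_
    intro s s' hidx b hb b' hb'
    rw [pvGT_getElem? arts s r] at hb
    rw [pvGT_getElem? arts s' r] at hb'
    rcases Option.map_eq_some_iff.1 hb with ⟨a, _, ha2⟩
    rcases Option.map_eq_some_iff.1 hb' with ⟨a', _, ha2'⟩
    rw [← ha2, ← ha2']
    rw [Prod.Lex.lt_iff]
    refine Or.inr ⟨rfl, ?_⟩
    simpa using hidx
  · rw [List.pairwise_map]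
    refine List.Pairwise.imp ?_ (List.pairwise_lt_range (n := arts.length + 1))
    intro r r' hrr x hx y hy
    have hx1 := pv_mem_block arts r x hx
    have hy1 := pv_mem_block arts r' y hy
    rw [Prod.Lex.lt_iff]
    left
    have hcast : ((r : Int)) < ((r' : Int)) := by exact_mod_cast hrr
    simpa [hx1, hy1] using hcast

lemma pv_sorted2_eq_canonT (arts : List (List (String × String))) :
    PySem.List.sorted2 (pvT arts) (fun t => t.1) (fun t => t.2.1) = pvCanonT arts := by
  rw [pv_sorted2_eq_sorted_lex]
  exact PySem.List.sorted_eq_of_perm_of_pairwise_lt _ _ _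
    (pv_canonT_perm arts) (pv_canonT_pairwise arts)

lemma pv_map_canonT (arts : List (List (String × String))) :
    (pvCanonT arts).map (fun t => t.2.2) = pvCanonFrom arts 0 := by
  unfold pvCanonT pvCanonFrom pvRound
  rw [Nat.sub_zero, ← List.range_eq_range']
  rw [List.map_flatMap]
  refine List.flatMap_congr ?_
  intro r _
  rw [List.map_filterMap]
  refine List.filterMap_congr ?_
  intro s _
  rw [pvGT_getElem? arts s r]
  cases h : (pvG arts s)[r]? <;> simp [h]

lemma pv_A_char (arts : List (List (String × String))) (m : Int)
    (hlt : ¬ (arts.length : Int) ≤ m) :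
    rank_macro_relevance arts m
      = PySem.List.slice ((pvCanonFrom arts 0).take (m - 0).toNat) none (some m) := by
  unfold rank_macro_relevance
  rw [if_neg hlt]
  have hinit : arts.foldl (fun d a => d.modify (pvSrc a) [] (fun l => l ++ [a]))
      PySem.Dict.empty = PySem.Dict.mk (pvQ arts 0) := by
    apply PySem.Dict.ext
    rw [pv_init_items, pvQ_zero]
  simp only [hinit]
  rw [pvOuterA_spec arts m (arts.length + 1) 0 [] (by omega)]
  simp

lemma pv_B_char (arts : List (List (String × String))) (m : Int)
    (hlt : ¬ (arts.length : Int) ≤ m) :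
    rank_macro_relevance_alt arts m
      = (PySem.List.slice (pvCanonT arts) none (some (max 0 m))).map (fun t => t.2.2) := by
  unfold rank_macro_relevance_alt
  rw [if_neg hlt]
  simp only [pvB_fold, pv_sorted2_eq_canonT]

-- ===== VERDICT (by name: the statement is the Claim_ definition above) =====
theorem rank_macro_relevance_spec : Claim_equal_rank_macro_relevance := by
  intro articles m _hdom
  unfold Spec_rank_macro_relevance
  by_cases hle : (articles.length : Int) ≤ m
  · unfold rank_macro_relevance rank_macro_relevance_alt
    rw [if_pos hle, if_pos hle]
  · rw [pv_A_char articles m hle, pv_B_char articles m hle]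
    by_cases hm : 0 ≤ m
    · rw [PySem.List.slice_to _ hm, PySem.List.slice_to _ (le_max_left 0 m),
        max_eq_right hm, Int.sub_zero]
      rw [List.take_take, Nat.min_self]
      rw [List.map_take, pv_map_canonT]
    · have hm0 : m.toNat = 0 := by omega
      have hmax : max 0 m = 0 := by omega
      rw [hmax, Int.sub_zero, hm0]
      rw [PySem.List.slice_to _ (le_refl 0)]
      simp [PySem.List.slice, PySem.List.clampIdx]
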